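-- pv_equiv track=rewrite | github.com/AdamOtto/Daily-Challenges | Challenge1259.py | Solution
-- ===== SOURCE A (Python) =====
-- def Solution(ar):
--     lastx = len(ar)
--     xCount = 0
--
--     for i in reversed(range(0, len(ar))):
--         if ar[i] == 'x':
--             lastx = i
--             break
--
--     if lastx == len(ar):
--         return 1
--
--     retVal = 0
--     for i in range(0, lastx):
--         if ar[i] == 'y':
--             retVal += 1
--     return retVal
-- ===== SOURCE B (Python) =====
-- def Solution(ar):
--     yCount = 0
--     found = False
--     ans = 0
--     for e in ar:
--         if e == 'x':
--             ans = yCount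
--             found = True
--         if e == 'y':
--             yCount += 1
--     return ans if found else 1
-- ===== Notes on version B (the rewrite author's own statement) =====
-- stated objective: simpler
-- what changed: Replaces A's two index-based passes (a reverse scan to locate the last 'x', then a count pass over the prefix) with one forward pass keeping a running y-count, a found flag and a snapshot answer taken at each 'x'.
import Mathlib
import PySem

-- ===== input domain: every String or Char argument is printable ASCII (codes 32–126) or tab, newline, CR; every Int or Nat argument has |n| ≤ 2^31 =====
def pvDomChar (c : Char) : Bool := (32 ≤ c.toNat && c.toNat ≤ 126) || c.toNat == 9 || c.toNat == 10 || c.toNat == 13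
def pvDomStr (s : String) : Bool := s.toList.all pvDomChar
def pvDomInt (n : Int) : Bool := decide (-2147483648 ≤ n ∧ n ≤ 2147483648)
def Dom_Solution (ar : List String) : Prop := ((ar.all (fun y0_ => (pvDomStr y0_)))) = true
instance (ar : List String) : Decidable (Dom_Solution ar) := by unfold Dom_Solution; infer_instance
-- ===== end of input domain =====

-- B replaces A's two index passes (reverse scan for the last 'x', then a count of the prefix)
-- by a single forward fold carrying a running y-count, a found flag and a snapshot answer.

-- ===== PORT A =====
-- 'for i in reversed(range(0, len(ar))): if ar[i]=="x": lastx=i; break' :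
-- lastxLoop ar n checks indices n-1, n-2, …, 0 in order; sentinel ar.length if no 'x'.
def lastxLoop (ar : List String) : Nat → Nat
  | 0 => ar.length
  | Nat.succ i => if ar.getD i "" = "x" then i else lastxLoop ar i

-- 'retVal = 0; for i in range(0, lastx): if ar[i]=="y": retVal += 1'
def countLoop (ar : List String) : Nat → Int
  | 0 => 0
  | Nat.succ i => countLoop ar i + (if ar.getD i "" = "y" then 1 else 0)

def Solution (ar : List String) : Int :=
  let lastx := lastxLoop ar ar.length
  if lastx = ar.length then 1
  else countLoop ar lastx

-- ===== PORT B =====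
-- single forward pass; state (yCount, found, ans)
def stepB (s : Int × Bool × Int) (e : String) : Int × Bool × Int :=
  let yc := s.1
  let found := s.2.1
  let ans := s.2.2
  let found' := if e = "x" then true else found
  let ans' := if e = "x" then yc else ans
  let yc' := if e = "y" then yc + 1 else yc
  (yc', found', ans')

def Solution_alt (ar : List String) : Int :=
  let s := ar.foldl stepB (0, false, 0)
  if s.2.1 then s.2.2 else 1

-- ===== PRECONDITION & SPEC =====
def Spec_Solution (ar : List String) (out : Int) : Prop := out = Solution_alt ar
instance (ar : List String) (out : Int) : Decidable (Spec_Solution ar out) := by unfold Spec_Solution; infer_instance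

-- ===== CLAIM (what is proved, stated in full; the proofs are below) =====
def Claim_equal_Solution : Prop := ∀ (ar : List String), Dom_Solution ar → Spec_Solution ar (Solution ar)

-- ===== LEMMAS AND PROOFS =====

theorem getD_append_lt (ar : List String) (e : String) (i : Nat) (h : i < ar.length) :
    (ar ++ [e]).getD i "" = ar.getD i "" := by
  simp [List.getD, List.getElem?_append_left h]

theorem countLoop_append (ar : List String) (e : String) (i : Nat) (h : i ≤ ar.length) :
    countLoop (ar ++ [e]) i = countLoop ar i := by
  induction i with
  | zero => rfl
  | succ n ih =>
      have hn : n < ar.length := h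
      simp only [countLoop]
      rw [ih (Nat.le_of_lt hn), getD_append_lt ar e n hn]

theorem lastxLoop_append (ar : List String) (e : String) (i : Nat) (h : i ≤ ar.length) :
    (lastxLoop (ar ++ [e]) i = lastxLoop ar i ∧ lastxLoop ar i < ar.length) ∨
    (lastxLoop (ar ++ [e]) i = ar.length + 1 ∧ lastxLoop ar i = ar.length) := by
  induction i with
  | zero => right; simp [lastxLoop]
  | succ n ih =>
      have hn : n < ar.length := h
      simp only [lastxLoop]
      rw [getD_append_lt ar e n hn]
      by_cases hx : ar.getD n "" = "x"
      · rw [if_pos hx, if_pos hx]; left; exact ⟨rfl, hn⟩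
      · rw [if_neg hx, if_neg hx]; exact ih (Nat.le_of_lt hn)

-- main invariant: the fold state vs A's helpers, by snoc induction
theorem fold_invariant (ar : List String) :
    (ar.foldl stepB (0, false, 0)).1 = countLoop ar ar.length ∧
    ((ar.foldl stepB (0, false, 0)).2.1 = false → lastxLoop ar ar.length = ar.length) ∧
    ((ar.foldl stepB (0, false, 0)).2.1 = true →
       lastxLoop ar ar.length < ar.length ∧
       (ar.foldl stepB (0, false, 0)).2.2 = countLoop ar (lastxLoop ar ar.length)) := by
  induction ar using List.reverseRecOn with
  | nil => refine ⟨rfl, fun _ => rfl, fun h => by simp [List.foldl] at h⟩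
  | append_singleton ar e ih =>
      obtain ⟨iyc, infound, ifound⟩ := ih
      have hfold : (ar ++ [e]).foldl stepB (0, false, 0) =
          stepB (ar.foldl stepB (0, false, 0)) e := by
        simp [List.foldl_append]
      have hlen : (ar ++ [e]).length = ar.length + 1 := by simp
      have hget : (ar ++ [e]).getD ar.length "" = e := by
        simp [List.getD]
      by_cases hx : e = "x"
      · -- last element is 'x': lastx = ar.length, answer = count of y's in ar
        have hlx : lastxLoop (ar ++ [e]) (ar.length + 1) = ar.length := by
          simp only [lastxLoop]
          rw [hget, if_pos hx]
        refine ⟨?_, ?_, ?_⟩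
        · rw [hfold, hlen]
          have : (stepB (ar.foldl stepB (0, false, 0)) e).1 =
              (if e = "y" then (ar.foldl stepB (0, false, 0)).1 + 1
               else (ar.foldl stepB (0, false, 0)).1) := rfl
          rw [this, iyc]
          simp only [countLoop]
          rw [countLoop_append ar e ar.length le_rfl, hget]
          by_cases hy : e = "y" <;> simp [hy]
        · intro h; rw [hfold] at h; simp [stepB, hx] at h
        · intro _
          rw [hlen, hlx]
          constructor
          · omega
          · rw [hfold]
            have : (stepB (ar.foldl stepB (0, false, 0)) e).2.2 =
                (ar.foldl stepB (0, false, 0)).1 := by simp [stepB, hx]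
            rw [this, iyc, countLoop_append ar e ar.length le_rfl]
      · -- last element not 'x': lastx and the answer are unchanged
        have hlx : lastxLoop (ar ++ [e]) (ar.length + 1) = lastxLoop (ar ++ [e]) ar.length := by
          simp only [lastxLoop]
          rw [hget, if_neg hx]
        have hfnd : ((ar ++ [e]).foldl stepB (0, false, 0)).2.1 =
            (ar.foldl stepB (0, false, 0)).2.1 := by
          rw [hfold]; simp [stepB, hx]
        have hans : ((ar ++ [e]).foldl stepB (0, false, 0)).2.2 =
            (ar.foldl stepB (0, false, 0)).2.2 := by
          rw [hfold]; simp [stepB, hx]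
        refine ⟨?_, ?_, ?_⟩
        · rw [hfold, hlen]
          have : (stepB (ar.foldl stepB (0, false, 0)) e).1 =
              (if e = "y" then (ar.foldl stepB (0, false, 0)).1 + 1
               else (ar.foldl stepB (0, false, 0)).1) := rfl
          rw [this, iyc]
          simp only [countLoop]
          rw [countLoop_append ar e ar.length le_rfl, hget]
          by_cases hy : e = "y" <;> simp [hy]
        · intro h
          rw [hfnd] at h
          have := infound h
          rw [hlen, hlx]
          rcases lastxLoop_append ar e ar.length le_rfl with ⟨_, h2⟩ | ⟨h1, _⟩
          · omega
          · omega
        · intro h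
          rw [hfnd] at h
          obtain ⟨hlt, hval⟩ := ifound h
          rcases lastxLoop_append ar e ar.length le_rfl with ⟨h1, h2⟩ | ⟨_, h2⟩
          · rw [hlen, hlx, h1]
            refine ⟨by omega, ?_⟩
            rw [hans, hval, countLoop_append ar e (lastxLoop ar ar.length) (Nat.le_of_lt h2)]
          · omega

-- ===== VERDICT (by name: the statement is the Claim_ definition above) =====
theorem Solution_spec : Claim_equal_Solution := by
  intro ar _
  unfold Spec_Solution Solution Solution_alt
  obtain ⟨_, hnf, hf⟩ := fold_invariant ar
  cases hfnd : (ar.foldl stepB (0, false, 0)).2.1 with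
  | false =>
      simp only [hnf hfnd]
      simp [hfnd]
  | true =>
      obtain ⟨hlt, hval⟩ := hf hfnd
      have hne : lastxLoop ar ar.length ≠ ar.length := Nat.ne_of_lt hlt
      simp [hne, hfnd, hval]
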